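-- pv_equiv track=rewrite | github.com/a-gavriel/Python-Games | Clases/Clases-Ejecicios/Soluciones/6a.py | comparar2
-- ===== SOURCE A (Python) =====
-- def comparar2 (vec1, vec2, v1inicio, v2inicio, posicion, tamaño):
--     if posicion == tamaño:
--         return True
--     else:
--         d1=vec1[v1inicio + posicion]
--         d2=vec2[v2inicio + posicion]
--         if d1==d2:
--             return comparar2(vec1,vec2, v1inicio, v2inicio,posicion+1,tamaño)
--         else:
--             return False
-- ===== SOURCE B (Python) =====
-- def comparar2(vec1, vec2, v1inicio, v2inicio, posicion, tamaño):
--     p = posicion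
--     while p != tamaño and vec1[v1inicio + p] == vec2[v2inicio + p]:
--         p += 1
--     return p == tamaño
-- ===== Notes on version B (the rewrite author's own statement) =====
-- stated objective: idiomatic
-- what changed: Replaces A's recursion by an explicit while-loop that advances a single cursor p under the compound condition 'p != tamaño and vec1[v1inicio+p] == vec2[v2inicio+p]' and returns one final comparison p == tamaño, instead of a recursive call per position with early True/False returns.
import Mathlib
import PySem

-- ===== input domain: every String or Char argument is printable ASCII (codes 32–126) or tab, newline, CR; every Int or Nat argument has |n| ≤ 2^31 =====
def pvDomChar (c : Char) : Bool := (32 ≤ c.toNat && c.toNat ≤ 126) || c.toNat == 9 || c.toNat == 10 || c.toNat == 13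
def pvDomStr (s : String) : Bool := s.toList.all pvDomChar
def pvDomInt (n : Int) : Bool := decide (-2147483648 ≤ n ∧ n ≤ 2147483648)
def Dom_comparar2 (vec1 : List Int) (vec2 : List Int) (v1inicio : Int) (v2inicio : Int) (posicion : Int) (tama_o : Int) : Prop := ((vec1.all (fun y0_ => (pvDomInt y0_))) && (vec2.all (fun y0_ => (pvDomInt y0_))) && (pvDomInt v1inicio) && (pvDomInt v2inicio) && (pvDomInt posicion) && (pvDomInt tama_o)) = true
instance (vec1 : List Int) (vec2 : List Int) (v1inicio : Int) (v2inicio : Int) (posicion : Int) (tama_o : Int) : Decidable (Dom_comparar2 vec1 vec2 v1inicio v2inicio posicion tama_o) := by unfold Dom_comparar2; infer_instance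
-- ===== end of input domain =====

-- B replaces A's recursion by an explicit while-loop advancing a single cursor under the compound
-- condition 'p != tamaño and vec1[v1inicio+p] == vec2[v2inicio+p]', returning one final comparison
-- p == tamaño instead of early True/False returns; same value on every input on which A returns.


-- ===== PORT A =====
-- A's recursion, with fuel; inside Pre_ the fuel is provably larger than the number of recursive
-- steps A makes before returning, so the fuel-0 fallback is never reached there.  The '| _, _ => false'
-- arm is Python's IndexError (excluded by Pre_).
def comparar2Go (vec1 : List Int) (vec2 : List Int) (v1inicio : Int) (v2inicio : Int) (tama_o : Int) : Int → Nat → Bool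
  | _, 0 => false
  | posicion, fuel + 1 =>
    if posicion = tama_o then true
    else
      match PySem.List.pyGet? vec1 (v1inicio + posicion), PySem.List.pyGet? vec2 (v2inicio + posicion) with
      | some d1, some d2 =>
        if d1 = d2 then comparar2Go vec1 vec2 v1inicio v2inicio tama_o (posicion + 1) fuel
        else false
      | _, _ => false

def comparar2 (vec1 : List Int) (vec2 : List Int) (v1inicio : Int) (v2inicio : Int) (posicion : Int) (tama_o : Int) : Bool :=
  comparar2Go vec1 vec2 v1inicio v2inicio tama_o posicion
    ((tama_o - posicion).toNat + 2 * vec1.length + 2 * vec2.length + 2)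

-- ===== PORT B =====
-- Source B's while condition 'p != tamaño and vec1[v1inicio+p] == vec2[v2inicio+p]'.  The reads are
-- rendered as pyGet? option values: the '.isSome' conjunct records that the read succeeded — where
-- it fails Python raises IndexError, which Pre_ excludes.
def altCond (vec1 : List Int) (vec2 : List Int) (v1inicio : Int) (v2inicio : Int) (tama_o : Int) (p : Int) : Bool :=
  p != tama_o && (PySem.List.pyGet? vec1 (v1inicio + p)).isSome
    && (PySem.List.pyGet? vec1 (v1inicio + p) == PySem.List.pyGet? vec2 (v2inicio + p))

-- the while-loop body: advance the cursor while the condition holds; the returned value is the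
-- final cursor.  Fuel bounds the iteration count; inside Pre_ it exceeds the real number of steps.
def altWhile (vec1 : List Int) (vec2 : List Int) (v1inicio : Int) (v2inicio : Int) (tama_o : Int) : Int → Nat → Int
  | p, 0 => p
  | p, fuel + 1 =>
    if altCond vec1 vec2 v1inicio v2inicio tama_o p then
      altWhile vec1 vec2 v1inicio v2inicio tama_o (p + 1) fuel
    else p

def comparar2_alt (vec1 : List Int) (vec2 : List Int) (v1inicio : Int) (v2inicio : Int) (posicion : Int) (tama_o : Int) : Bool :=
  decide (altWhile vec1 vec2 v1inicio v2inicio tama_o posicion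
    ((tama_o - posicion).toNat + 2 * (vec1.length + vec2.length) + 2) = tama_o)

-- ===== PRECONDITION & SPEC =====
-- Pre_ = exactly the inputs on which Python's A RETURNS (anywhere else A raises IndexError or
-- RecursionError): some step k stops the recursion — either the window end is reached or a
-- mismatch of two successfully read elements — after k steps of successful equal reads that do
-- not reach the window end.  The bound on k is harmless: a stopping step is preceded by k
-- successful reads at consecutive indices of both lists, so k ≤ 2·min(len1, len2) always holds.
def Pre_comparar2 (vec1 : List Int) (vec2 : List Int) (v1inicio : Int) (v2inicio : Int) (posicion : Int) (tama_o : Int) : Prop :=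
  ∃ k : Nat, k ≤ 2 * min vec1.length vec2.length ∧
    (∀ j : Nat, j < k → posicion + j ≠ tama_o ∧ ((PySem.List.pyGet? vec1 (v1inicio + (posicion + j))).isSome = true ∧ PySem.List.pyGet? vec1 (v1inicio + (posicion + j)) = PySem.List.pyGet? vec2 (v2inicio + (posicion + j)))) ∧
    (posicion + k = tama_o ∨ ((PySem.List.pyGet? vec1 (v1inicio + (posicion + k))).isSome = true ∧ (PySem.List.pyGet? vec2 (v2inicio + (posicion + k))).isSome = true ∧ PySem.List.pyGet? vec1 (v1inicio + (posicion + k)) ≠ PySem.List.pyGet? vec2 (v2inicio + (posicion + k))))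
instance (vec1 : List Int) (vec2 : List Int) (v1inicio : Int) (v2inicio : Int) (posicion : Int) (tama_o : Int) : Decidable (Pre_comparar2 vec1 vec2 v1inicio v2inicio posicion tama_o) := by unfold Pre_comparar2; infer_instance

def pvWitness_comparar2 : List Int × List Int × Int × Int × Int × Int := ([1, 2], [1, 2], 0, 0, 0, 2)

def Spec_comparar2 (vec1 : List Int) (vec2 : List Int) (v1inicio : Int) (v2inicio : Int) (posicion : Int) (tama_o : Int) (out : Bool) : Prop := out = comparar2_alt vec1 vec2 v1inicio v2inicio posicion tama_o
instance (vec1 : List Int) (vec2 : List Int) (v1inicio : Int) (v2inicio : Int) (posicion : Int) (tama_o : Int) (out : Bool) : Decidable (Spec_comparar2 vec1 vec2 v1inicio v2inicio posicion tama_o out) := by unfold Spec_comparar2; infer_instance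

-- ===== CLAIM (what is proved, stated in full; the proofs are below) =====
def Claim_equal_comparar2 : Prop := ∀ (vec1 : List Int) (vec2 : List Int) (v1inicio : Int) (v2inicio : Int) (posicion : Int) (tama_o : Int), Dom_comparar2 vec1 vec2 v1inicio v2inicio posicion tama_o → Pre_comparar2 vec1 vec2 v1inicio v2inicio posicion tama_o → Spec_comparar2 vec1 vec2 v1inicio v2inicio posicion tama_o (comparar2 vec1 vec2 v1inicio v2inicio posicion tama_o)

-- ===== LEMMAS AND PROOFS =====
-- a successful read pins the index inside [-len, len)
theorem pvInRange_of_isSome {xs : List Int} {i : Int}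
    (h : (PySem.List.pyGet? xs i).isSome = true) : -(xs.length : Int) ≤ i ∧ i < (xs.length : Int) := by
  by_contra hc
  have : PySem.List.pyGet? xs i = none := by
    rw [PySem.List.pyGet?_eq_none_iff]
    simpa [PySem.Raise.InRange] using hc
  rw [this] at h
  simp at h

-- one unfolding step of A's recursion when both reads succeed
theorem go_step (vec1 vec2 : List Int) (v1inicio v2inicio tama_o posicion : Int) (f : Nat)
    (d1 d2 : Int) (hne : posicion ≠ tama_o)
    (hd1 : PySem.List.pyGet? vec1 (v1inicio + posicion) = some d1)
    (hd2 : PySem.List.pyGet? vec2 (v2inicio + posicion) = some d2) :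
    comparar2Go vec1 vec2 v1inicio v2inicio tama_o posicion (f + 1) =
      if d1 = d2 then comparar2Go vec1 vec2 v1inicio v2inicio tama_o (posicion + 1) f else false := by
  rw [comparar2Go, if_neg hne, hd1, hd2]

-- A returns true when the recursion reaches the window end through k equal reads
theorem goTrue (vec1 vec2 : List Int) (v1inicio v2inicio tama_o : Int) :
    ∀ (k : Nat) (posicion : Int) (fuel : Nat), posicion + k = tama_o → k < fuel →
      (∀ j : Nat, j < k → ((PySem.List.pyGet? vec1 (v1inicio + (posicion + j))).isSome = true ∧ PySem.List.pyGet? vec1 (v1inicio + (posicion + j)) = PySem.List.pyGet? vec2 (v2inicio + (posicion + j)))) →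
      comparar2Go vec1 vec2 v1inicio v2inicio tama_o posicion fuel = true := by
  intro k
  induction k with
  | zero =>
    intro posicion fuel hend hfuel _
    obtain ⟨f, rfl⟩ : ∃ f, fuel = f + 1 := ⟨fuel - 1, by omega⟩
    simp only [Int.natCast_zero, add_zero] at hend
    simp [comparar2Go, hend]
  | succ n ih =>
    intro posicion fuel hend hfuel hsteps
    obtain ⟨f, rfl⟩ : ∃ f, fuel = f + 1 := ⟨fuel - 1, by omega⟩
    have hne : posicion ≠ tama_o := by omega
    obtain ⟨h1, h2⟩ := hsteps 0 (Nat.succ_pos n)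
    simp only [Int.natCast_zero, add_zero] at h1 h2
    obtain ⟨d, hd⟩ := Option.isSome_iff_exists.mp h1
    rw [go_step vec1 vec2 v1inicio v2inicio tama_o posicion f d d hne hd (h2.symm.trans hd), if_pos rfl]
    apply ih (posicion + 1) f (by push_cast; push_cast at hend; omega) (by omega)
    intro j hj
    have := hsteps (j + 1) (by omega)
    have harith : posicion + ((j : Int) + 1) = posicion + 1 + j := by ring
    simpa [harith] using this

-- A returns false when the recursion hits a mismatch after k equal reads short of the window end
theorem goFalse (vec1 vec2 : List Int) (v1inicio v2inicio tama_o : Int) :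
    ∀ (k : Nat) (posicion : Int) (fuel : Nat), k < fuel →
      (∀ j : Nat, j < k → posicion + j ≠ tama_o ∧ ((PySem.List.pyGet? vec1 (v1inicio + (posicion + j))).isSome = true ∧ PySem.List.pyGet? vec1 (v1inicio + (posicion + j)) = PySem.List.pyGet? vec2 (v2inicio + (posicion + j)))) →
      posicion + k ≠ tama_o → ((PySem.List.pyGet? vec1 (v1inicio + (posicion + k))).isSome = true ∧ (PySem.List.pyGet? vec2 (v2inicio + (posicion + k))).isSome = true ∧ PySem.List.pyGet? vec1 (v1inicio + (posicion + k)) ≠ PySem.List.pyGet? vec2 (v2inicio + (posicion + k))) →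
      comparar2Go vec1 vec2 v1inicio v2inicio tama_o posicion fuel = false := by
  intro k
  induction k with
  | zero =>
    intro posicion fuel hfuel _ hne hmis
    obtain ⟨f, rfl⟩ : ∃ f, fuel = f + 1 := ⟨fuel - 1, by omega⟩
    simp only [Int.natCast_zero, add_zero] at hne hmis
    obtain ⟨h1, h2, h3⟩ := hmis
    obtain ⟨d1, hd1⟩ := Option.isSome_iff_exists.mp h1
    obtain ⟨d2, hd2⟩ := Option.isSome_iff_exists.mp h2
    have hdne : d1 ≠ d2 := by rintro rfl; exact h3 (hd1.trans hd2.symm)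
    rw [go_step vec1 vec2 v1inicio v2inicio tama_o posicion f d1 d2 hne hd1 hd2, if_neg hdne]
  | succ n ih =>
    intro posicion fuel hfuel hsteps hne hmis
    obtain ⟨f, rfl⟩ : ∃ f, fuel = f + 1 := ⟨fuel - 1, by omega⟩
    obtain ⟨hne0, h1, h2⟩ := hsteps 0 (Nat.succ_pos n)
    simp only [Int.natCast_zero, add_zero] at hne0 h1 h2
    obtain ⟨d, hd⟩ := Option.isSome_iff_exists.mp h1
    rw [go_step vec1 vec2 v1inicio v2inicio tama_o posicion f d d hne0 hd (h2.symm.trans hd), if_pos rfl]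
    have harith : ∀ j : Int, posicion + (j + 1) = posicion + 1 + j := by intro j; ring
    apply ih (posicion + 1) f (by omega)
    · intro j hj
      have := hsteps (j + 1) (by omega)
      push_cast at this ⊢
      simpa [harith] using this
    · push_cast at hne ⊢; simpa [harith] using hne
    · push_cast at hmis ⊢; simpa [harith] using hmis

-- B's cursor reaches the window end through k satisfied loop conditions
theorem whileEnd (vec1 vec2 : List Int) (v1inicio v2inicio tama_o : Int) :
    ∀ (k : Nat) (posicion : Int) (fuel : Nat), posicion + k = tama_o → k ≤ fuel →
      (∀ j : Nat, j < k → ((PySem.List.pyGet? vec1 (v1inicio + (posicion + j))).isSome = true ∧ PySem.List.pyGet? vec1 (v1inicio + (posicion + j)) = PySem.List.pyGet? vec2 (v2inicio + (posicion + j)))) →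
      altWhile vec1 vec2 v1inicio v2inicio tama_o posicion fuel = tama_o := by
  intro k
  induction k with
  | zero =>
    intro posicion fuel hend _ _
    simp only [Int.natCast_zero, add_zero] at hend
    cases fuel with
    | zero => simpa [altWhile] using hend
    | succ f =>
      rw [altWhile, if_neg (by simp [altCond, hend])]
      exact hend
  | succ n ih =>
    intro posicion fuel hend hfuel hsteps
    obtain ⟨f, rfl⟩ : ∃ f, fuel = f + 1 := ⟨fuel - 1, by omega⟩
    have hne : posicion ≠ tama_o := by omega
    obtain ⟨h1, h2⟩ := hsteps 0 (Nat.succ_pos n)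
    simp only [Int.natCast_zero, add_zero] at h1 h2
    rw [altWhile, if_pos (by simp [altCond, hne, h1, ← h2])]
    apply ih (posicion + 1) f (by push_cast; push_cast at hend; omega) (by omega)
    intro j hj
    have := hsteps (j + 1) (by omega)
    have harith : posicion + ((j : Int) + 1) = posicion + 1 + j := by ring
    simpa [harith] using this

-- B's cursor stops at the first mismatch, short of the window end
theorem whileStop (vec1 vec2 : List Int) (v1inicio v2inicio tama_o : Int) :
    ∀ (k : Nat) (posicion : Int) (fuel : Nat), k < fuel →
      (∀ j : Nat, j < k → posicion + j ≠ tama_o ∧ ((PySem.List.pyGet? vec1 (v1inicio + (posicion + j))).isSome = true ∧ PySem.List.pyGet? vec1 (v1inicio + (posicion + j)) = PySem.List.pyGet? vec2 (v2inicio + (posicion + j)))) →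
      posicion + k ≠ tama_o → PySem.List.pyGet? vec1 (v1inicio + (posicion + k)) ≠ PySem.List.pyGet? vec2 (v2inicio + (posicion + k)) →
      altWhile vec1 vec2 v1inicio v2inicio tama_o posicion fuel = posicion + k := by
  intro k
  induction k with
  | zero =>
    intro posicion fuel hfuel _ hne hmis
    obtain ⟨f, rfl⟩ : ∃ f, fuel = f + 1 := ⟨fuel - 1, by omega⟩
    simp only [Int.natCast_zero, add_zero] at hne hmis ⊢
    rw [altWhile, if_neg (by simp [altCond]; intro _ _; exact hmis)]
  | succ n ih =>
    intro posicion fuel hfuel hsteps hne hmis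
    obtain ⟨f, rfl⟩ : ∃ f, fuel = f + 1 := ⟨fuel - 1, by omega⟩
    obtain ⟨hne0, h1, h2⟩ := hsteps 0 (Nat.succ_pos n)
    simp only [Int.natCast_zero, add_zero] at hne0 h1 h2
    rw [altWhile, if_pos (by simp [altCond, hne0, h1, ← h2])]
    push_cast at hne hmis ⊢
    have harith : ∀ j : Int, posicion + (j + 1) = posicion + 1 + j := by intro j; ring
    rw [harith] at hne hmis ⊢
    apply ih (posicion + 1) f (by omega)
    · intro j hj
      have := hsteps (j + 1) (by omega)
      push_cast at this ⊢
      simpa [harith] using this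
    · exact hne
    · exact hmis

-- inside Pre_, a stopping step k fits under both ports' fuels
theorem kFuel (vec1 vec2 : List Int) (v1inicio v2inicio posicion tama_o : Int) (k : Nat)
    (hsteps : ∀ j : Nat, j < k → posicion + j ≠ tama_o ∧ ((PySem.List.pyGet? vec1 (v1inicio + (posicion + j))).isSome = true ∧ PySem.List.pyGet? vec1 (v1inicio + (posicion + j)) = PySem.List.pyGet? vec2 (v2inicio + (posicion + j))))
    (hk : (PySem.List.pyGet? vec1 (v1inicio + (posicion + k))).isSome = true) :
    k < 2 * vec1.length + 1 := by
  rcases Nat.eq_zero_or_pos k with hk0 | hk0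
  · omega
  · have h0 := (hsteps 0 hk0).2.1
    simp only [Int.natCast_zero, add_zero] at h0
    have hr0 := pvInRange_of_isSome h0
    have hrk := pvInRange_of_isSome hk
    omega

-- ===== VERDICT (by name: the statement is the Claim_ definition above) =====
theorem comparar2_spec : Claim_equal_comparar2 := by
  intro vec1 vec2 v1inicio v2inicio posicion tama_o _hdom hpre
  obtain ⟨k, hkb, hsteps, hstop⟩ := hpre
  unfold Spec_comparar2 comparar2 comparar2_alt
  by_cases hend : posicion + k = tama_o
  · -- window completed: A returns true, B's cursor reaches tama_o
    rw [goTrue vec1 vec2 v1inicio v2inicio tama_o k posicion _ hend (by omega)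
        (fun j hj => (hsteps j hj).2)]
    rw [whileEnd vec1 vec2 v1inicio v2inicio tama_o k posicion _ hend (by omega)
        (fun j hj => (hsteps j hj).2)]
    simp
  · -- mismatch: A returns false, B's cursor stops short of tama_o
    rcases hstop with hstop | hmis
    · exact absurd hstop hend
    · have hfit := kFuel vec1 vec2 v1inicio v2inicio posicion tama_o k hsteps hmis.1
      rw [goFalse vec1 vec2 v1inicio v2inicio tama_o k posicion _ (by omega) hsteps hend hmis]
      rw [whileStop vec1 vec2 v1inicio v2inicio tama_o k posicion _ (by omega) hsteps hend hmis.2.2]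
      simp [hend]
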